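-- pv_equiv track=rewrite | github.com/kit-developer/AugmentPlot | test.py | get_same_l_attr
-- ===== SOURCE A (Python) =====
-- def get_same_l_attr(attr_tree):
--     same_l_attr_num = {}
--     include_l_attr_num = {}
--     for g_attr, g_attr_groups in attr_tree.items():
--         same = {x: g_attr_groups.count(x) for x in set(g_attr_groups) if g_attr_groups.count(x) > 1}
--         same_l_attr_num[g_attr] = same
--
--         include_l_attr_num[g_attr] = {}
--         for l_attrs in g_attr_groups:
--             included_by_others = [
--                 all([l_attr in _l_attrs for l_attr in l_attrs]) for _l_attrs in g_attr_groups
--             ].count(True)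
--             if included_by_others > 1:
--                 include_l_attr_num[g_attr][l_attrs] = included_by_others
--     return same_l_attr_num, include_l_attr_num
-- ===== SOURCE B (Python) =====
-- def get_same_l_attr(attr_tree):
--     same_l_attr_num = {}
--     include_l_attr_num = {}
--     for g_attr, groups in attr_tree.items():
--         # one pass: distinct groups in first-occurrence order + multiplicity table
--         mult = {}
--         uniq = []
--         for g in groups:
--             if g in mult:
--                 mult[g] += 1
--             else:
--                 mult[g] = 1
--                 uniq.append(g)
--         same_l_attr_num[g_attr] = {g: mult[g] for g in uniq if mult[g] > 1}
--         # inverted index: attribute -> distinct groups containing it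
--         index = {}
--         for g in uniq:
--             for a in set(g):
--                 index[a] = index.get(a, []) + [g]
--         # supersets of g = intersection of the posting lists of g's attributes
--         inc = {}
--         for g in uniq:
--             hits = uniq
--             for a in set(g):
--                 posting = index.get(a, [])
--                 hits = [h for h in hits if h in posting]
--             w = sum(mult[h] for h in hits)
--             if w > 1:
--                 inc[g] = w
--         include_l_attr_num[g_attr] = inc
--     return same_l_attr_num, include_l_attr_num
-- ===== Notes on version B (the rewrite author's own statement) =====
-- stated objective: alternative
-- what changed: B builds an inverted index (attribute -> distinct groups containing it) plus a one-pass multiplicity table, and computes each group's including-groups as the intersection of its attributes' posting lists weighted by multiplicity, instead of A's full-list rescans (count per set member and a membership scan over all groups per occurrence).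
import Mathlib
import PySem

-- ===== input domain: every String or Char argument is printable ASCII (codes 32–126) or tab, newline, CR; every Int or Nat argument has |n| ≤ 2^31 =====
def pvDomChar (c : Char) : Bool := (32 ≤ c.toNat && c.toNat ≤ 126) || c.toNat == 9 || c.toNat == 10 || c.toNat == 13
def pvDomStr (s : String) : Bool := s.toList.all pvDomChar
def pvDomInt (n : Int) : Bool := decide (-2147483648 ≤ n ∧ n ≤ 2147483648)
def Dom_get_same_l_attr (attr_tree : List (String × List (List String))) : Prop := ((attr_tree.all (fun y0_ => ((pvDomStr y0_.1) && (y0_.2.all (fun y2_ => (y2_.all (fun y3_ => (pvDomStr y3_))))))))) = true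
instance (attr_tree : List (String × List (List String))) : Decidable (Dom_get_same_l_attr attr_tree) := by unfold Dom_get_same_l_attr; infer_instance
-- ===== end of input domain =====

-- B replaces A's quadratic membership rescans by an inverted index (attribute -> distinct groups
-- containing it): the groups including a given group are the intersection of its attributes'
-- posting lists, weighted by a one-pass multiplicity table (objective: alternative; same results).

-- ===== PORT A =====
-- same = {x: g_attr_groups.count(x) for x in set(g_attr_groups) if g_attr_groups.count(x) > 1}
def pvA_same (groups : List (List String)) : PySem.Dict (List String) Int :=
  (PySem.Set.ofList groups).foldl
    (fun d x => if groups.count x > 1 then d.insert x ((groups.count x : Nat) : Int) else d)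
    PySem.Dict.empty

-- the inner 'for l_attrs in g_attr_groups' loop filling include_l_attr_num[g_attr]
def pvA_inc (groups : List (List String)) : PySem.Dict (List String) Int :=
  groups.foldl
    (fun d l =>
      let included_by_others : Int :=
        ((groups.map (fun g => l.all (fun a => g.contains a))).count true : Nat)
      if included_by_others > 1 then d.insert l included_by_others else d)
    PySem.Dict.empty

def get_same_l_attr (attr_tree : List (String × List (List String))) : (List (String × List (List String × Int))) × (List (String × List (List String × Int))) :=
  let r := attr_tree.foldl
    (fun (acc : PySem.Dict String (List (List String × Int)) × PySem.Dict String (List (List String × Int))) p =>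
      (acc.1.insert p.1 (pvA_same p.2).items, acc.2.insert p.1 (pvA_inc p.2).items))
    (PySem.Dict.empty, PySem.Dict.empty)
  (r.1.items, r.2.items)

-- ===== PORT B =====
-- the first loop: (mult, uniq) — multiplicity dict and first-occurrence distinct list
def pvB_scan (groups : List (List String)) : PySem.Dict (List String) Int × List (List String) :=
  groups.foldl
    (fun acc g =>
      if acc.1.contains g then (acc.1.insert g (acc.1.getD g 0 + 1), acc.2)
      else (acc.1.insert g 1, acc.2 ++ [g]))
    (PySem.Dict.empty, [])

-- {g: mult[g] for g in uniq if mult[g] > 1}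
def pvB_same (mult : PySem.Dict (List String) Int) (uniq : List (List String)) : PySem.Dict (List String) Int :=
  uniq.foldl (fun d g => if mult.getD g 0 > 1 then d.insert g (mult.getD g 0) else d)
    PySem.Dict.empty

-- for g in uniq: for a in set(g): index[a] = index.get(a, []) + [g]
def pvB_index (uniq : List (List String)) : PySem.Dict String (List (List String)) :=
  uniq.foldl
    (fun d g => (PySem.Set.ofList g).foldl (fun d a => d.insert a (d.getD a [] ++ [g])) d)
    PySem.Dict.empty

-- hits = uniq; for a in set(g): hits = [h for h in hits if h in index.get(a, [])]
def pvB_hits (index : PySem.Dict String (List (List String))) (uniq : List (List String))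
    (g : List String) : List (List String) :=
  (PySem.Set.ofList g).foldl
    (fun hits a => hits.filter (fun h => (index.getD a []).contains h)) uniq

-- for g in uniq: w = sum(mult[h] for h in hits); if w > 1: inc[g] = w
def pvB_inc (mult : PySem.Dict (List String) Int) (index : PySem.Dict String (List (List String)))
    (uniq : List (List String)) : PySem.Dict (List String) Int :=
  uniq.foldl
    (fun d g =>
      let w : Int := (pvB_hits index uniq g).foldl (fun s h => s + mult.getD h 0) 0
      if w > 1 then d.insert g w else d)
    PySem.Dict.empty

def get_same_l_attr_alt (attr_tree : List (String × List (List String))) : (List (String × List (List String × Int))) × (List (String × List (List String × Int))) :=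
  let r := attr_tree.foldl
    (fun (acc : PySem.Dict String (List (List String × Int)) × PySem.Dict String (List (List String × Int))) p =>
      let s := pvB_scan p.2
      let index := pvB_index s.2
      (acc.1.insert p.1 (pvB_same s.1 s.2).items, acc.2.insert p.1 (pvB_inc s.1 index s.2).items))
    (PySem.Dict.empty, PySem.Dict.empty)
  (r.1.items, r.2.items)

-- ===== PRECONDITION & SPEC =====
def Spec_get_same_l_attr (attr_tree : List (String × List (List String))) (out : (List (String × List (List String × Int))) × (List (String × List (List String × Int)))) : Prop := out = get_same_l_attr_alt attr_tree
instance (attr_tree : List (String × List (List String))) (out : (List (String × List (List String × Int))) × (List (String × List (List String × Int)))) : Decidable (Spec_get_same_l_attr attr_tree out) := by unfold Spec_get_same_l_attr; exact instDecidableEqProd _ _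

-- ===== CLAIM (what is proved, stated in full; the proofs are below) =====
def Claim_equal_get_same_l_attr : Prop := ∀ (attr_tree : List (String × List (List String))), Dom_get_same_l_attr attr_tree → Spec_get_same_l_attr attr_tree (get_same_l_attr attr_tree)

-- ===== LEMMAS AND PROOFS =====

-- proof-side name for the inclusion count both programs compute per group
def pvN (groups : List (List String)) (l : List String) : Int :=
  ((groups.map (fun g => l.all (fun a => g.contains a))).count true : Nat)

-- dedup over an appended element
lemma pv_dedup_append_singleton {α : Type} [BEq α] [LawfulBEq α] (xs : List α) (x : α) :
    PySem.List.dedup (xs ++ [x]) =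
      if x ∈ xs then PySem.List.dedup xs else PySem.List.dedup xs ++ [x] := by
  simp only [PySem.List.dedup_eq_ofList]
  rw [PySem.Set.ofList_append_singleton, PySem.Set.add_eq_ite]
  simp [PySem.Set.mem_ofList]

-- a 'if p x: d[x] = f(x)' loop from {} builds exactly the filtered dedup as an items list
lemma pv_fold_ins {α ν : Type} [BEq α] [LawfulBEq α] [DecidableEq α]
    (p : α → Prop) [DecidablePred p] (f : α → ν) (xs : List α) :
    (xs.foldl (fun d x => if p x then d.insert x (f x) else d)
        (PySem.Dict.empty : PySem.Dict α ν)).items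
      = ((PySem.List.dedup xs).filter (fun x => decide (p x))).map (fun x => (x, f x)) := by
  induction xs using List.reverseRecOn with
  | nil => rfl
  | append_singleton xs x ih =>
    rw [List.foldl_append, List.foldl_cons, List.foldl_nil, pv_dedup_append_singleton]
    by_cases hpx : p x
    · by_cases hx : x ∈ xs
      · rw [if_pos hpx, if_pos hx]
        have hcont : (List.foldl (fun d x => if p x then d.insert x (f x) else d)
            (PySem.Dict.empty : PySem.Dict α ν) xs).contains x = true := by
          rw [PySem.Dict.contains_eq_decide_mem_keys]
          simp [PySem.Dict.keys, ih, List.mem_map, List.mem_filter, hx, hpx]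
        have hins : ∀ (d : PySem.Dict α ν), d.contains x = true →
            (d.insert x (f x)).items
              = d.items.map (fun q => if q.1 == x then (x, f x) else q) := by
          intro d hd
          simp [PySem.Dict.insert, hd]
        rw [hins _ hcont, ih, List.map_map]
        apply List.map_congr_left
        intro y _
        by_cases hyx : y = x
        · subst hyx; simp
        · simp [hyx]
      · rw [if_pos hpx, if_neg hx]
        have hcont : (List.foldl (fun d x => if p x then d.insert x (f x) else d)
            (PySem.Dict.empty : PySem.Dict α ν) xs).contains x = false := by
          rw [PySem.Dict.contains_eq_decide_mem_keys]
          simp [PySem.Dict.keys, ih, List.mem_map, List.mem_filter, hx]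
        have hins : ∀ (d : PySem.Dict α ν), d.contains x = false →
            (d.insert x (f x)).items = d.items ++ [(x, f x)] := by
          intro d hd
          simp [PySem.Dict.insert, hd]
        rw [hins _ hcont, ih, List.filter_append, List.map_append]
        simp [hpx]
    · rw [if_neg hpx]
      by_cases hx : x ∈ xs
      · simp [hx, ih]
      · simp [hx, ih, List.filter_append, hpx]

-- sum of multiplicities over the distinct elements satisfying p = countP p
lemma pv_sum_counts {α : Type} [BEq α] [LawfulBEq α] (xs : List α) (s : List α)
    (hs : s.Nodup) (hsub : ∀ a ∈ xs, a ∈ s) (p : α → Bool) :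
    ((s.filter p).map (fun g => (xs.count g : Int))).sum = (xs.countP p : Int) := by
  induction xs with
  | nil => simp
  | cons x xs ih =>
    have hx : x ∈ s := hsub x (List.mem_cons_self)
    have hsplit : (fun g => (((x :: xs).count g : Nat) : Int))
        = fun g => ((xs.count g : Nat) : Int) + (if g == x then (1 : Int) else 0) := by
      funext g
      by_cases h : (g == x) = true
      · have hg : g = x := by simpa using h
        subst hg
        simp
      · simp [List.count_cons, h]
        exact fun e => h (by simp [e])
    rw [hsplit, PySem.List.sum_map_add_int,
      ih (fun a ha => hsub a (List.mem_cons_of_mem _ ha))]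
    have hind : ((s.filter p).map (fun g => if g == x then (1 : Int) else 0)).sum
        = if p x then (1 : Int) else 0 := by
      have h1 : ((s.filter p).map (fun g => if g == x then (1 : Int) else 0)).sum
          = (((s.filter p).count x : Nat) : Int) := by
        rw [List.count_eq_countP]
        rw [show ((s.filter p).map (fun g => if g == x then (1 : Int) else 0))
            = ((s.filter p).map (fun g => if (g == x) = true then (1 : Int) else 0)) from by
          simp]
        rw [PySem.List.sum_map_ite_one_zero (fun g => g == x) (s.filter p)]
      rw [h1]
      by_cases hpx : p x
      · rw [List.count_filter (by simpa using hpx)]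
        rw [List.count_eq_one_of_mem hs hx]
        simp [hpx]
      · have : (s.filter p).count x = 0 := by
          rw [List.count_eq_zero]
          simp [List.mem_filter, hpx]
        simp [this, hpx]
    rw [hind, List.countP_cons]
    by_cases hpx : p x <;> simp [hpx]

lemma pv_count_true_map {α : Type} (f : α → Bool) (l : List α) :
    (l.map f).count true = l.countP f := by
  induction l with
  | nil => rfl
  | cons x xs ih => simp [List.count_cons, List.countP_cons, ih]

-- B's first loop computes exactly (Counter(groups), first-occurrence dedup of groups)
lemma pv_scan_eq (groups : List (List String)) :
    pvB_scan groups = (PySem.Dict.counter groups, PySem.Set.ofList groups) := by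
  unfold pvB_scan
  induction groups using List.reverseRecOn with
  | nil => rfl
  | append_singleton xs g ih =>
    rw [List.foldl_append, List.foldl_cons, List.foldl_nil, ih,
      PySem.Set.ofList_append_singleton, PySem.Set.add_eq_ite]
    have hc : (PySem.Dict.counter xs).contains g = xs.contains g :=
      PySem.Dict.contains_counter xs g
    have hcnt : (PySem.Dict.counter xs).insert g ((PySem.Dict.counter xs).getD g 0 + 1)
        = PySem.Dict.counter (xs ++ [g]) := by
      rw [← PySem.Dict.foldl_insert_getD_add_one_eq_counter xs,
        ← PySem.Dict.foldl_insert_getD_add_one_eq_counter (xs ++ [g]),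
        List.foldl_append, List.foldl_cons, List.foldl_nil]
    by_cases hg : g ∈ xs
    · have hct : xs.contains g = true := List.contains_iff_mem.mpr hg
      have hgs : g ∈ PySem.Set.ofList xs := (PySem.Set.mem_ofList xs g).mpr hg
      rw [hc, hct, if_pos rfl, hcnt, if_pos hgs]
    · have hf : xs.contains g = false := by
        simp [hg]
      have h0 : (PySem.Dict.counter xs).getD g 0 = 0 :=
        PySem.Dict.getD_of_not_contains _ _ (by rw [hc, hf])
      have hgs : g ∉ PySem.Set.ofList xs := fun h => hg ((PySem.Set.mem_ofList xs g).mp h)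
      rw [hc, hf]
      simp only [Bool.false_eq_true, if_false, if_neg hgs]
      rw [← hcnt, h0, zero_add]

-- effect of one inner index loop (over the nodup attribute set of g) on a single key
lemma pv_index_step (g : List String) (d : PySem.Dict String (List (List String)))
    (as : List String) (hnd : as.Nodup) (a : String) :
    (as.foldl (fun d a => d.insert a (d.getD a [] ++ [g])) d).getD a []
      = if a ∈ as then d.getD a [] ++ [g] else d.getD a [] := by
  induction as generalizing d with
  | nil => simp
  | cons b bs ih =>
    rw [List.foldl_cons]
    rcases List.nodup_cons.mp hnd with ⟨hb, hbs⟩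
    rw [ih _ hbs]
    by_cases hab : a = b
    · subst hab
      have : a ∉ bs := hb
      simp [this, PySem.Dict.getD_insert_self]
    · rw [PySem.Dict.getD_insert_of_ne _ _ _ hab]
      by_cases habs : a ∈ bs <;> simp [habs, hab]

-- the inverted index's posting list for attribute a = the distinct groups containing a
lemma pv_index_getD (uniq : List (List String)) (a : String) :
    (pvB_index uniq).getD a [] = uniq.filter (fun g => g.contains a) := by
  unfold pvB_index
  induction uniq using List.reverseRecOn with
  | nil => simp
  | append_singleton xs g ih =>
    rw [List.foldl_append, List.foldl_cons, List.foldl_nil,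
      pv_index_step g _ _ (PySem.Set.nodup_ofList g) a, List.filter_append]
    by_cases hag : g.contains a = true
    · have ha : a ∈ g := List.contains_iff_mem.mp hag
      have hs : a ∈ PySem.Set.ofList g := (PySem.Set.mem_ofList g a).mpr ha
      simp [hs, ih, ha]
    · have hna : a ∉ g := fun h => hag (List.contains_iff_mem.mpr h)
      have hs : a ∉ PySem.Set.ofList g := fun h => hna ((PySem.Set.mem_ofList g a).mp h)
      simp [hs, ih, hna]

-- repeated filtering by posting-list membership = one filter by the conjunction
lemma pv_fold_filter (uniq : List (List String)) (as : List String) (P : List String → Bool) :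
    as.foldl (fun hs a => hs.filter (fun h => (uniq.filter (fun x => x.contains a)).contains h))
        (uniq.filter P)
      = uniq.filter (fun h => P h && as.all (fun a => h.contains a)) := by
  induction as generalizing P with
  | nil => simp
  | cons a as ih =>
    rw [List.foldl_cons, List.filter_filter, ih]
    apply List.filter_congr
    intro h hh
    cases hP : P h <;> simp [List.mem_filter, hh]

lemma pv_all_ofList (g : List String) (f : String → Bool) :
    (PySem.Set.ofList g).all f = g.all f := by
  by_cases h : g.all f = true
  · rw [h, List.all_eq_true]
    intro x hx
    exact (List.all_eq_true.mp h) x ((PySem.Set.mem_ofList g x).mp hx)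
  · simp only [Bool.not_eq_true] at h
    rw [h, List.all_eq_false]
    obtain ⟨x, hx, hfx⟩ := List.all_eq_false.mp h
    exact ⟨x, (PySem.Set.mem_ofList g x).mpr hx, hfx⟩

-- the intersection of the posting lists of g's attributes = the distinct groups including g
lemma pv_hits_eq (uniq : List (List String)) (g : List String) :
    pvB_hits (pvB_index uniq) uniq g
      = uniq.filter (fun h => g.all (fun a => h.contains a)) := by
  unfold pvB_hits
  simp only [pv_index_getD]
  have h := pv_fold_filter uniq (PySem.Set.ofList g) (fun _ => true)
  simp only [List.filter_true, Bool.true_and] at h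
  rw [h]
  simp [pv_all_ofList]

-- B's weighted intersection sum = A's per-occurrence inclusion count
lemma pv_w_eq_n (groups : List (List String)) (g : List String) :
    ((pvB_hits (pvB_index (PySem.Set.ofList groups)) (PySem.Set.ofList groups) g).foldl
        (fun s h => s + (PySem.Dict.counter groups).getD h 0) 0)
      = pvN groups g := by
  rw [pv_hits_eq, PySem.List.foldl_add
    (g := fun h => (PySem.Dict.counter groups).getD h 0), zero_add]
  have : ((PySem.Set.ofList groups).filter (fun h => g.all (fun a => h.contains a))).map
      (fun h => (PySem.Dict.counter groups).getD h 0)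
      = ((PySem.Set.ofList groups).filter (fun h => g.all (fun a => h.contains a))).map
        (fun h => (groups.count h : Int)) := by
    apply List.map_congr_left
    intro h _
    exact PySem.Dict.getD_counter groups h
  rw [this, pv_sum_counts groups (PySem.Set.ofList groups) (PySem.Set.nodup_ofList groups)
    (fun a ha => (PySem.Set.mem_ofList groups a).mpr ha)
    (fun h => g.all (fun a => h.contains a))]
  unfold pvN
  rw [pv_count_true_map]

lemma pv_same_eq (groups : List (List String)) :
    (pvA_same groups).items = (pvB_same (pvB_scan groups).1 (pvB_scan groups).2).items := by
  unfold pvA_same pvB_same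
  rw [pv_scan_eq]
  rw [pv_fold_ins (p := fun x => groups.count x > 1)
    (f := fun x => ((groups.count x : Nat) : Int)) (xs := PySem.Set.ofList groups)]
  rw [pv_fold_ins (p := fun g => (PySem.Dict.counter groups).getD g 0 > 1)
    (f := fun g => (PySem.Dict.counter groups).getD g 0) (xs := PySem.Set.ofList groups)]
  simp only [PySem.List.dedup_eq_ofList, PySem.Set.ofList_ofList]
  have hcg : ∀ x, (PySem.Dict.counter groups).getD x 0 = (groups.count x : Int) :=
    fun x => PySem.Dict.getD_counter groups x
  have hfilter : ((PySem.Set.ofList groups).filter (fun x => decide (groups.count x > 1)))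
      = ((PySem.Set.ofList groups).filter
          (fun g => decide ((PySem.Dict.counter groups).getD g 0 > 1))) := by
    apply List.filter_congr
    intro x _
    rw [hcg]
    simp [Nat.one_lt_cast]
  rw [hfilter]
  apply List.map_congr_left
  intro x _
  rw [hcg]

lemma pv_inc_eq (groups : List (List String)) :
    (pvA_inc groups).items
      = (pvB_inc (pvB_scan groups).1 (pvB_index (pvB_scan groups).2) (pvB_scan groups).2).items := by
  unfold pvA_inc pvB_inc
  rw [pv_scan_eq]
  have hA : (fun (d : PySem.Dict (List String) Int) l =>
      let included_by_others : Int :=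
        ((groups.map (fun g => l.all (fun a => g.contains a))).count true : Nat)
      if included_by_others > 1 then d.insert l included_by_others else d)
      = fun d l => if pvN groups l > 1 then d.insert l (pvN groups l) else d := rfl
  have hB : (fun (d : PySem.Dict (List String) Int) g =>
      let w : Int := (pvB_hits (pvB_index (PySem.Set.ofList groups)) (PySem.Set.ofList groups) g).foldl
        (fun s h => s + (PySem.Dict.counter groups).getD h 0) 0
      if w > 1 then d.insert g w else d)
      = fun d g => if pvN groups g > 1 then d.insert g (pvN groups g) else d := by
    funext d g
    simp only [pv_w_eq_n]
  rw [hA, hB]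
  rw [pv_fold_ins (p := fun l => pvN groups l > 1) (f := fun l => pvN groups l) (xs := groups)]
  rw [pv_fold_ins (p := fun l => pvN groups l > 1) (f := fun l => pvN groups l)
    (xs := PySem.Set.ofList groups)]
  simp only [PySem.List.dedup_eq_ofList, PySem.Set.ofList_ofList]

-- ===== VERDICT (by name: the statement is the Claim_ definition above) =====
theorem get_same_l_attr_spec : Claim_equal_get_same_l_attr := by
  intro attr_tree _
  unfold Spec_get_same_l_attr get_same_l_attr get_same_l_attr_alt
  simp only [pv_same_eq, pv_inc_eq]
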